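-- pv_equiv track=rewrite | github.com/aliosmangurbilek/1.-sinif-projelerim | Vize Projesi (A) ve (B) şıkkı Takvim İşlemleri.py | yilin_gun_adedini_bul
-- ===== SOURCE A (Python) =====
-- def yilin_gun_adedini_bul(yil, ay, gun):
--     gun_sayisi = 0
--
--     #yılların içindeki gün sayısını hesap ediyoruz.
--     for x in range(1900, yil + 1):
--         if(artik_yil(x)):
--             gun_sayisi = gun_sayisi + 366
--         else:
--             gun_sayisi = gun_sayisi + 365
--     #ayların içindeki gün sayısını hesap ediyoruz.
--     for x in range(1, ay):
--         gun_sayisi = gun_sayisi + ay_gunleri(yil, x)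
--     #günleri hesap ediyoruz.
--     gun_sayisi = gun_sayisi + gun
--     return gun_sayisi
--
-- def artik_yil (yil):
--     if yil % 400 == 0 :
--         return True
--     if yil % 100 == 0 :
--         return False
--     if yil % 4 == 0 :
--         return True
--     return False
--
-- def ay_gunleri (yil,ay):
--     if ay == 1 or ay == 3 or ay == 5 or ay == 7 \
--         or ay == 8 or ay == 10 or ay == 12 :
--         return 31
--     else:
--         if ay == 2:
--             if artik_yil(yil):
--                 return 29
--             else:
--                 return 28
--         else:
--             return 30
-- ===== SOURCE B (Python) =====
-- _CUM = [0, 31, 59, 90, 120, 151, 181, 212, 243, 273, 304, 334]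
--
-- def _artik(yil):
--     return yil % 4 == 0 and (yil % 100 != 0 or yil % 400 == 0)
--
-- def _artik_sayisi(a, b):
--     """Number of leap years y with a <= y <= b (0 if the interval is empty)."""
--     def f(y):
--         return y // 4 - y // 100 + y // 400
--     return max(f(b) - f(a - 1), 0)
--
-- def yilin_gun_adedini_bul(yil, ay, gun):
--     tam_yil = max(yil - 1899, 0)  # years 1900..yil
--     toplam = 365 * tam_yil + _artik_sayisi(1900, yil)
--     if ay > 1:  # days of the completed months of the current year
--         toplam += _CUM[ay - 1]
--     if ay > 2 and _artik(yil):
--         toplam += 1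
--     return toplam + gun
-- ===== Notes on version B (the rewrite author's own statement) =====
-- stated objective: alternative
-- what changed: Replaces A's per-year and per-month loops by a closed form (floor-division inclusion-exclusion leap-year count over the interval 1900..yil plus a cumulative month-length table); Pre_ excludes month numbers above 12, on which A's loop adds phantom 30-day months (an accident of ay_gunleri's else-branch) while B's table lookup raises IndexError.
-- outside the precondition, e.g. on yilin_gun_adedini_bul(2000, 13, 1): A returns 37257, B raises IndexError
import Mathlib
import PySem

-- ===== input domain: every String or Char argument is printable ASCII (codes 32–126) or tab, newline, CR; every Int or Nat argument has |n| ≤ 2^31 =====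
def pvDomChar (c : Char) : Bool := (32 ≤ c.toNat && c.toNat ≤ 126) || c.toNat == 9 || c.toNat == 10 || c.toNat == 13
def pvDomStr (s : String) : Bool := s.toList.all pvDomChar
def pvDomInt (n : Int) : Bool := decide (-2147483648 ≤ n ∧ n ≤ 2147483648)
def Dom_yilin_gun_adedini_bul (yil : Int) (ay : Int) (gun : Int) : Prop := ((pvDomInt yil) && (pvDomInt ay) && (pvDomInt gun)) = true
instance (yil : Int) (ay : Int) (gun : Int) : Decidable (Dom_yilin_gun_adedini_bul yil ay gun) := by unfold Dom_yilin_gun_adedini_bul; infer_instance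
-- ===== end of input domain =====

-- B replaces A's per-year and per-month loops by a closed form (floor-division
-- inclusion–exclusion leap count + cumulative month table).

-- ===== PORT A =====
def artik_yil (yil : Int) : Bool :=
  if PySem.Int.mod yil 400 = 0 then true
  else if PySem.Int.mod yil 100 = 0 then false
  else if PySem.Int.mod yil 4 = 0 then true
  else false

def ay_gunleri (yil : Int) (ay : Int) : Int :=
  if ay = 1 ∨ ay = 3 ∨ ay = 5 ∨ ay = 7 ∨ ay = 8 ∨ ay = 10 ∨ ay = 12 then 31
  else if ay = 2 then (if artik_yil yil then 29 else 28)
  else 30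

def yilin_gun_adedini_bul (yil : Int) (ay : Int) (gun : Int) : Int :=
  let g1 := (PySem.List.pyRange 1900 (yil + 1) 1).foldl
    (fun acc x => if artik_yil x then acc + 366 else acc + 365) 0
  let g2 := (PySem.List.pyRange 1 ay 1).foldl (fun acc x => acc + ay_gunleri yil x) g1
  g2 + gun

-- ===== PORT B =====
def pvCum : List Int := [0, 31, 59, 90, 120, 151, 181, 212, 243, 273, 304, 334]

def pvArtikAlt (yil : Int) : Bool :=
  (PySem.Int.mod yil 4 == 0) && (!(PySem.Int.mod yil 100 == 0) || (PySem.Int.mod yil 400 == 0))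

def pvF (y : Int) : Int :=
  PySem.Int.floordiv y 4 - PySem.Int.floordiv y 100 + PySem.Int.floordiv y 400

-- leap years y with a ≤ y ≤ b (0 if the interval is empty)
def pvArtikSayisi (a b : Int) : Int := max (pvF b - pvF (a - 1)) 0

def yilin_gun_adedini_bul_alt (yil : Int) (ay : Int) (gun : Int) : Int :=
  let tam_yil := max (yil - 1899) 0
  let t1 := 365 * tam_yil + pvArtikSayisi 1900 yil
  -- _CUM[ay - 1]; the index is in range on Pre_ (Python raises IndexError above 12)
  let t2 := if 1 < ay then t1 + PySem.List.pyGetD pvCum (ay - 1) 0 else t1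
  let t3 := if 2 < ay ∧ pvArtikAlt yil = true then t2 + 1 else t2
  t3 + gun

-- ===== PRECONDITION & SPEC =====
-- Pre_ excludes month numbers above 12, on which A's loop adds phantom
-- 30-day months (an accident of ay_gunleri's else-branch) while B's table
-- lookup raises IndexError.
def Pre_yilin_gun_adedini_bul (yil : Int) (ay : Int) (gun : Int) : Prop :=
  ay ≤ 12
instance (yil : Int) (ay : Int) (gun : Int) : Decidable (Pre_yilin_gun_adedini_bul yil ay gun) := by unfold Pre_yilin_gun_adedini_bul; infer_instance

def pvWitness_yilin_gun_adedini_bul : Int × Int × Int := (2024, 5, 10)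

def Spec_yilin_gun_adedini_bul (yil : Int) (ay : Int) (gun : Int) (out : Int) : Prop := out = yilin_gun_adedini_bul_alt yil ay gun
instance (yil : Int) (ay : Int) (gun : Int) (out : Int) : Decidable (Spec_yilin_gun_adedini_bul yil ay gun out) := by unfold Spec_yilin_gun_adedini_bul; infer_instance

-- ===== CLAIM (what is proved, stated in full; the proofs are below) =====
def Claim_equal_yilin_gun_adedini_bul : Prop := ∀ (yil : Int) (ay : Int) (gun : Int), Dom_yilin_gun_adedini_bul yil ay gun → Pre_yilin_gun_adedini_bul yil ay gun → Spec_yilin_gun_adedini_bul yil ay gun (yilin_gun_adedini_bul yil ay gun)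

-- ===== LEMMAS AND PROOFS =====

lemma pvF_step (y : Int) :
    pvF (y + 1) = pvF y + (if artik_yil (y + 1) then 1 else 0) := by
  unfold pvF artik_yil
  simp only [PySem.Int.floordiv_eq_ediv_of_pos (by norm_num : (0:Int) < 4),
    PySem.Int.floordiv_eq_ediv_of_pos (by norm_num : (0:Int) < 100),
    PySem.Int.floordiv_eq_ediv_of_pos (by norm_num : (0:Int) < 400),
    PySem.Int.mod_eq_emod_of_pos (by norm_num : (0:Int) < 4),
    PySem.Int.mod_eq_emod_of_pos (by norm_num : (0:Int) < 100),
    PySem.Int.mod_eq_emod_of_pos (by norm_num : (0:Int) < 400)]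
  have h4 : (y+1)/4 = y/4 + (if (y+1)%4 = 0 then 1 else 0) := by split <;> omega
  have h100 : (y+1)/100 = y/100 + (if (y+1)%100 = 0 then 1 else 0) := by split <;> omega
  have h400 : (y+1)/400 = y/400 + (if (y+1)%400 = 0 then 1 else 0) := by split <;> omega
  rw [h4, h100, h400]
  have c1 : (y+1)%400 = 0 -> (y+1)%100 = 0 := by omega
  have c2 : (y+1)%100 = 0 -> (y+1)%4 = 0 := by omega
  by_cases m400 : (y+1)%400 = 0
  · have m100 := c1 m400
    have m4 := c2 m100
    simp [m400, m100, m4] <;> omega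
  · by_cases m100 : (y+1)%100 = 0
    · have m4 := c2 m100
      simp [m400, m100, m4] <;> omega
    · by_cases m4 : (y+1)%4 = 0
      · simp [m400, m100, m4] <;> omega
      · simp [m400, m100, m4] <;> omega

lemma pvF_mono_succ (y : Int) : pvF y ≤ pvF (y + 1) := by
  rw [pvF_step]; split <;> omega

lemma pvF_ge_1900 (yil : Int) (h : 1900 ≤ yil) : 460 ≤ pvF yil := by
  refine Int.le_induction (m := 1900) (by decide) (fun n _ ih => ?_) yil h
  exact le_trans ih (pvF_mono_succ n)

lemma pvF_le_1899 (yil : Int) (h : yil ≤ 1899) : pvF yil ≤ 460 := by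
  refine Int.le_induction_down (m := 1899) (by decide) (fun n _ ih => ?_) yil h
  have := pvF_mono_succ (n - 1)
  rw [show n - 1 + 1 = n by ring] at this
  omega

-- the per-year body of A's first loop, written additively
lemma pvYearBody :
    (fun (acc x : Int) => if artik_yil x then acc + 366 else acc + 365)
      = fun acc x => acc + (if artik_yil x then 366 else 365) := by
  funext acc x; split <;> rfl

lemma pvYearSum (n : Nat) :
    ((PySem.List.pyRange 1900 (1900 + (n : Int)) 1).map
        (fun x => if artik_yil x then (366 : Int) else 365)).sum
      = 365 * n + pvF (1899 + n) - 460 := by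
  induction n with
  | zero =>
    rw [show ((1900:Int) + (0:Nat)) = 1900 by norm_num, PySem.List.pyRange_one_eq_nil le_rfl]
    decide
  | succ m ih =>
    have h : ((1900:Int) + ((m + 1 : Nat) : Int)) = (1900 + (m : Int)) + 1 := by push_cast; ring
    rw [h, PySem.List.pyRange_one_succ_right (by omega), List.map_append, List.sum_append]
    have h2 : ((1899:Int) + ((m + 1 : Nat) : Int)) = (1899 + (m : Int)) + 1 := by push_cast; ring
    have h4 : ((1900:Int) + (m : Int)) = (1899 + (m : Int)) + 1 := by ring
    rw [h2, pvF_step (1899 + (m : Int)), ih]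
    simp only [List.map_cons, List.map_nil, List.sum_cons, List.sum_nil, h4]
    split <;> push_cast <;> ring

-- A's year loop equals B's clamped closed form, for every yil
lemma pvYearClosed (yil : Int) :
    ((PySem.List.pyRange 1900 (yil + 1) 1).map
        (fun x => if artik_yil x then (366 : Int) else 365)).sum
      = 365 * max (yil - 1899) 0 + pvArtikSayisi 1900 yil := by
  unfold pvArtikSayisi
  have h1899 : pvF (1900 - 1) = 460 := by decide
  rw [h1899]
  by_cases hy : 1900 ≤ yil
  · rw [show yil + 1 = 1900 + (((yil - 1899).toNat : Nat) : Int) by omega,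
      pvYearSum (yil - 1899).toNat,
      show (((yil - 1899).toNat : Nat) : Int) = yil - 1899 by omega,
      show (1899:Int) + (yil - 1899) = yil by ring]
    have hge := pvF_ge_1900 yil hy
    rw [max_eq_left (by omega : (0:Int) ≤ yil - 1899),
      max_eq_left (by omega : (0:Int) ≤ pvF yil - 460)]
    ring
  · have hle := pvF_le_1899 yil (by omega)
    rw [PySem.List.pyRange_one_eq_nil (by omega : yil + 1 ≤ 1900),
      max_eq_right (by omega : yil - 1899 ≤ 0), max_eq_right (by omega : pvF yil - 460 ≤ 0)]
    simp

-- month-loop total for real months 1..12: cumulative-table entry + February leap day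
lemma pvMonthSum (yil ay : Int) (h12 : ay ≤ 12) :
    ((PySem.List.pyRange 1 ay 1).map (ay_gunleri yil)).sum
      = (if 1 < ay then PySem.List.pyGetD pvCum (ay - 1) 0 else 0)
        + (if 2 < ay ∧ artik_yil yil = true then 1 else 0) := by
  rcases lt_or_ge 1 ay with h1 | h1
  swap
  · rw [PySem.List.pyRange_one_eq_nil h1, if_neg (by omega),
      if_neg (by omega : ¬ (2 < ay ∧ artik_yil yil = true))]
    simp
  rw [if_pos h1]
  interval_cases ay <;>
    rcases Bool.eq_false_or_eq_true (artik_yil yil) with hb | hb <;>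
      · simp [PySem.List.pyRange_one, List.range_succ, ay_gunleri, hb, pvCum,
          PySem.List.pyGetD, PySem.List.pyGet?, PySem.List.pyIdx?]
        try norm_num

-- B's leap test agrees with A's
lemma pvArtik_agree (yil : Int) : pvArtikAlt yil = artik_yil yil := by
  unfold pvArtikAlt artik_yil
  simp only [PySem.Int.mod_eq_emod_of_pos (by norm_num : (0:Int) < 4),
    PySem.Int.mod_eq_emod_of_pos (by norm_num : (0:Int) < 100),
    PySem.Int.mod_eq_emod_of_pos (by norm_num : (0:Int) < 400)]
  have c1 : yil % 400 = 0 -> yil % 100 = 0 := by omega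
  have c2 : yil % 100 = 0 -> yil % 4 = 0 := by omega
  by_cases m400 : yil % 400 = 0
  · simp [m400, c1 m400, c2 (c1 m400)]
  · by_cases m100 : yil % 100 = 0
    · simp [m400, m100, c2 m100]
    · by_cases m4 : yil % 4 = 0 <;> simp [m400, m100, m4] <;> omega

-- ===== VERDICT (by name: the statement is the Claim_ definition above) =====
theorem yilin_gun_adedini_bul_spec : Claim_equal_yilin_gun_adedini_bul := by
  intro yil ay gun _ hpre
  unfold Spec_yilin_gun_adedini_bul
  simp only [yilin_gun_adedini_bul, yilin_gun_adedini_bul_alt]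
  rw [pvYearBody, PySem.List.foldl_add, PySem.List.foldl_add,
    pvYearClosed yil, pvMonthSum yil ay hpre, pvArtik_agree]
  split_ifs <;> ring
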